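-- pv_equiv track=rewrite | github.com/PandemiaProject/pandemia | src/pandemia/components/vaccination_model/simple_vaccination_model.py | _determine_age_group_index
-- ===== SOURCE A (Python) =====
-- def _determine_age_group_index(age, age_groups):
--     """Determine to which age group the agent belongs"""
--
--     if age >= age_groups[-1]:
--         return len(age_groups) - 1
--     elif age < age_groups[0]:
--         return 0
--     else:
--         i = 0
--         while age < age_groups[i] or age >= age_groups[i+1]:
--             i = i + 1
--         return i
-- ===== SOURCE B (Python) =====
-- def _determine_age_group_index(age, age_groups):
--     """Determine to which age group the agent belongs (binary search)"""
--
--     if age >= age_groups[-1]: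
--         return len(age_groups) - 1
--     if age < age_groups[0]:
--         return 0
--     lo, hi = 0, len(age_groups)
--     while lo < hi:
--         mid = (lo + hi) // 2
--         if age < age_groups[mid]:
--             hi = mid
--         else:
--             lo = mid + 1
--     return lo - 1
-- ===== Notes on version B (the rewrite author's own statement) =====
-- stated objective: alternative
-- what changed: The linear while-scan over adjacent group boundaries is replaced by a hand-written binary search (bisect_right) over the sorted boundary list, keeping the two end-clamping guards; O(log n) by algorithm, though a timing run's random (unsorted, outside-Pre_) inputs could not verify a speed-up.
-- outside the precondition, e.g. on _determine_age_group_index(7, [0, 10, 5, 20]): A returns 0, B returns 2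
import Mathlib
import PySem

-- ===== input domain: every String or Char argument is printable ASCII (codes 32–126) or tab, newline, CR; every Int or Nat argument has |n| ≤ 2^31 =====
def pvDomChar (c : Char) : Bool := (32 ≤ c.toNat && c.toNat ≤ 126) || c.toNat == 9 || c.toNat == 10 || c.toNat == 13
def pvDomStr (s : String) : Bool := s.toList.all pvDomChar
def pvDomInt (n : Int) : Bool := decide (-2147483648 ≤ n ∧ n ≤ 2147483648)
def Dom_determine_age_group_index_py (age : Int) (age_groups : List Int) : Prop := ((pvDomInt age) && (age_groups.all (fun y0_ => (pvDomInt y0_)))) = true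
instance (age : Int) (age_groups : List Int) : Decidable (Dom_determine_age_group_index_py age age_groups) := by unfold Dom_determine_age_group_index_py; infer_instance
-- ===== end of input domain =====

-- B replaces A's linear adjacent-boundary scan with a binary search (bisect_right) over the
-- sorted boundary list, keeping the two end-clamping guards: objective = alternative algorithm.


-- ===== PORT A =====
-- A's while loop: `while age < ags[i] or age >= ags[i+1]: i += 1`; fuel = ags.length bounds the
-- iterations (inside Pre_ the loop exits earlier); a none from pyGet? is Python's IndexError
-- (outside Pre_), where we return 0.
def pvALoop (age : Int) (ags : List Int) : Nat → Nat → Int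
  | 0, i => Int.ofNat i
  | fuel + 1, i =>
    match PySem.List.pyGet? ags (Int.ofNat i), PySem.List.pyGet? ags (Int.ofNat i + 1) with
    | some a, some b =>
      if age < a || age ≥ b then pvALoop age ags fuel (i + 1) else Int.ofNat i
    | _, _ => 0

def determine_age_group_index_py (age : Int) (age_groups : List Int) : Int :=
  match PySem.List.pyGet? age_groups (-1), PySem.List.pyGet? age_groups 0 with
  | some last, some first =>
    if age ≥ last then Int.ofNat age_groups.length - 1
    else if age < first then 0
    else pvALoop age age_groups age_groups.length 0
  | _, _ => 0  -- empty list: Python raises IndexError (outside Pre_)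

-- ===== PORT B =====
-- Source B's `while lo < hi` bisect loop; fuel = ags.length ≥ hi - lo bounds the iterations.
-- `age_groups[mid]` always has 0 ≤ mid < len inside the loop, so List.getD is exact there.
def pvBLoop (age : Int) (ags : List Int) : Nat → Nat → Nat → Nat
  | 0, lo, _ => lo
  | fuel + 1, lo, hi =>
    if lo < hi then
      let mid := (lo + hi) / 2
      if age < ags.getD mid 0 then pvBLoop age ags fuel lo mid
      else pvBLoop age ags fuel (mid + 1) hi
    else lo

def determine_age_group_index_py_alt (age : Int) (age_groups : List Int) : Int :=
  match PySem.List.pyGet? age_groups (-1), PySem.List.pyGet? age_groups 0 with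
  | some last, some first =>
    if age ≥ last then Int.ofNat age_groups.length - 1
    else if age < first then 0
    else Int.ofNat (pvBLoop age age_groups age_groups.length 0 age_groups.length) - 1
  | _, _ => 0  -- empty list: Python raises IndexError (outside Pre_)

-- ===== PRECONDITION & SPEC =====
-- Pre_ excludes the empty list (A raises IndexError) and unsorted boundary lists on which
-- neither end-clamping guard fires: the age-group boundaries are assumed sorted by the function's
-- purpose, and on an unsorted list no particular bucket is the specified answer (a linear scan and
-- a binary search legitimately pick different indices there; either value is as defensible).
def Pre_determine_age_group_index_py (age : Int) (age_groups : List Int) : Prop :=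
  age_groups ≠ [] ∧
    (List.Pairwise (· ≤ ·) age_groups ∨
      (∃ z, age_groups.getLast? = some z ∧ age ≥ z) ∨
      (∃ z, age_groups.head? = some z ∧ age < z))
instance (age : Int) (age_groups : List Int) : Decidable (Pre_determine_age_group_index_py age age_groups) := by unfold Pre_determine_age_group_index_py; infer_instance

def pvWitness_determine_age_group_index_py : Int × List Int := (5, [0, 10, 20])

def Spec_determine_age_group_index_py (age : Int) (age_groups : List Int) (out : Int) : Prop := out = determine_age_group_index_py_alt age age_groups
instance (age : Int) (age_groups : List Int) (out : Int) : Decidable (Spec_determine_age_group_index_py age age_groups out) := by unfold Spec_determine_age_group_index_py; infer_instance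

-- ===== CLAIM =====
def Claim_equal_determine_age_group_index_py : Prop := ∀ (age : Int) (age_groups : List Int), Dom_determine_age_group_index_py age age_groups → Pre_determine_age_group_index_py age age_groups → Spec_determine_age_group_index_py age age_groups (determine_age_group_index_py age age_groups)

-- ===== LEMMAS AND PROOFS =====

-- k := number of leading elements ≤ age (the bisect_right insertion point on a sorted list).
def pvK (age : Int) : List Int → Nat
  | [] => 0
  | x :: xs => if x ≤ age then pvK age xs + 1 else 0

theorem pvK_le_length (age : Int) (ags : List Int) : pvK age ags ≤ ags.length := by
  induction ags with
  | nil => simp [pvK]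
  | cons x xs ih => simp only [pvK, List.length_cons]; split <;> omega

theorem pvK_lt (age : Int) (ags : List Int) :
    ∀ {j : Nat}, j < pvK age ags → ags.getD j 0 ≤ age := by
  induction ags with
  | nil => intro j h; simp [pvK] at h
  | cons x xs ih =>
    intro j h
    simp only [pvK] at h
    by_cases hx : x ≤ age
    · simp only [if_pos hx] at h
      cases j with
      | zero => simpa using hx
      | succ j => simpa using ih (by omega)
    · simp [if_neg hx] at h

theorem pvK_stop (age : Int) (ags : List Int) :
    pvK age ags < ags.length → age < ags.getD (pvK age ags) 0 := by
  induction ags with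
  | nil => intro h; simp [pvK] at h
  | cons x xs ih =>
    intro h
    simp only [pvK] at h ⊢
    by_cases hx : x ≤ age
    · simp only [if_pos hx] at h ⊢
      simpa using ih (by simpa using h)
    · simp only [if_neg hx]
      simpa using lt_of_not_ge hx

theorem pv_sorted_getD_mono (ags : List Int) (hs : List.Pairwise (· ≤ ·) ags)
    {i j : Nat} (hij : i ≤ j) (hj : j < ags.length) :
    ags.getD i 0 ≤ ags.getD j 0 := by
  rcases eq_or_lt_of_le hij with rfl | hlt
  · exact le_refl _
  · have := (List.pairwise_iff_getElem.mp hs) i j (by omega) hj hlt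
    simpa [List.getD_eq_getElem?_getD, List.getElem?_eq_getElem, hj, show i < ags.length by omega] using this

theorem pvK_ge (age : Int) (ags : List Int) (hs : List.Pairwise (· ≤ ·) ags)
    {j : Nat} (hj : j < ags.length) (hk : pvK age ags ≤ j) : age < ags.getD j 0 := by
  have hstop := pvK_stop age ags (by omega)
  exact lt_of_lt_of_le hstop (pv_sorted_getD_mono ags hs hk hj)

theorem pv_pyGet?_getD (ags : List Int) {n : Nat} (h : n < ags.length) :
    PySem.List.pyGet? ags (Int.ofNat n) = some (ags.getD n 0) := by
  rw [show (Int.ofNat n) = ((n : Nat) : Int) from rfl, PySem.List.pyGet?_natCast]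
  simp [List.getD_eq_getElem?_getD, h]

theorem pvALoop_eq (age : Int) (ags : List Int)
    (hk1 : 1 ≤ pvK age ags) (hk2 : pvK age ags < ags.length) :
    ∀ fuel i, i ≤ pvK age ags - 1 → pvK age ags - i ≤ fuel →
      pvALoop age ags fuel i = Int.ofNat (pvK age ags - 1) := by
  intro fuel
  induction fuel with
  | zero => intro i h1 h2; omega
  | succ fuel ih =>
    intro i h1 h2
    have hi : i < ags.length := by omega
    have hi1 : i + 1 < ags.length := by omega
    unfold pvALoop
    rw [pv_pyGet?_getD ags hi, show Int.ofNat i + 1 = Int.ofNat (i+1) by simp only [Int.ofNat_eq_natCast]; push_cast; ring,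
        pv_pyGet?_getD ags hi1]
    simp only
    by_cases hend : i = pvK age ags - 1
    · have hc1 : ¬ age < ags.getD i 0 := not_lt.mpr (pvK_lt age ags (by omega))
      have hc2 : ¬ age ≥ ags.getD (i+1) 0 := by
        have : age < ags.getD (pvK age ags) 0 := pvK_stop age ags hk2
        rw [show i + 1 = pvK age ags by omega]
        omega
      rw [if_neg (by simp only [Bool.or_eq_true, decide_eq_true_eq, not_or]; omega)]
      exact congrArg Int.ofNat hend
    · have hc2 : age ≥ ags.getD (i+1) 0 := pvK_lt age ags (by omega)
      rw [if_pos (by simp only [Bool.or_eq_true, decide_eq_true_eq]; omega)]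
      exact ih (i+1) (by omega) (by omega)

theorem pvBLoop_eq (age : Int) (ags : List Int) (hs : List.Pairwise (· ≤ ·) ags) :
    ∀ fuel lo hi, lo ≤ pvK age ags → pvK age ags ≤ hi → hi ≤ ags.length →
      hi - lo ≤ fuel → pvBLoop age ags fuel lo hi = pvK age ags := by
  intro fuel
  induction fuel with
  | zero =>
    intro lo hi h1 h2 h3 h4
    simp only [pvBLoop]; omega
  | succ fuel ih =>
    intro lo hi h1 h2 h3 h4
    unfold pvBLoop
    by_cases hlh : lo < hi
    · rw [if_pos hlh]
      simp only
      set mid := (lo + hi) / 2 with hmid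
      have hmlo : lo ≤ mid := by omega
      have hmhi : mid < hi := by omega
      by_cases hcmp : age < ags.getD mid 0
      · rw [if_pos hcmp]
        have hkmid : pvK age ags ≤ mid := by
          by_contra hlt
          exact absurd (pvK_lt age ags (by omega)) (not_le.mpr hcmp)
        exact ih lo mid h1 hkmid (by omega) (by omega)
      · rw [if_neg hcmp]
        have hkmid : mid < pvK age ags := by
          by_contra hge
          exact hcmp (pvK_ge age ags hs (by omega) (by omega))
        exact ih (mid+1) hi (by omega) h2 h3 (by omega)
    · rw [if_neg hlh]; omega

-- ===== VERDICT =====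
theorem determine_age_group_index_py_spec : Claim_equal_determine_age_group_index_py := by
  intro age ags _ hpre
  obtain ⟨hne, hdisj⟩ := hpre
  have hl : 0 < ags.length := List.length_pos_iff.mpr hne
  have hlast : PySem.List.pyGet? ags (-1) = some (ags.getD (ags.length - 1) 0) := by
    rw [PySem.List.pyGet?_neg_one, List.getLast?_eq_getElem?]
    simp [List.getD_eq_getElem?_getD, Nat.sub_lt hl Nat.one_pos]
  have hfirst : PySem.List.pyGet? ags 0 = some (ags.getD 0 0) := by
    simpa using pv_pyGet?_getD ags hl
  unfold Spec_determine_age_group_index_py determine_age_group_index_py determine_age_group_index_py_alt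
  rw [hlast, hfirst]
  simp only
  by_cases hg1 : age ≥ ags.getD (ags.length - 1) 0
  · simp only [if_pos hg1]
  · simp only [if_neg hg1]
    by_cases hg2 : age < ags.getD 0 0
    · simp only [if_pos hg2]
    · simp only [if_neg hg2]
      have hs : List.Pairwise (· ≤ ·) ags := by
        rcases hdisj with hs | ⟨z, hz, hzge⟩ | ⟨z, hz, hzlt⟩
        · exact hs
        · exfalso
          apply hg1
          rw [List.getLast?_eq_getElem?] at hz
          have : ags.getD (ags.length - 1) 0 = z := by
            simp [List.getD_eq_getElem?_getD, hz]
          omega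
        · exfalso
          apply hg2
          rw [List.head?_eq_getElem?] at hz
          have : ags.getD 0 0 = z := by
            simp [List.getD_eq_getElem?_getD, hz]
          omega
      have hk1 : 1 ≤ pvK age ags := by
        by_contra h
        have h0 : pvK age ags = 0 := by omega
        have hstop := pvK_stop age ags (by omega)
        rw [h0] at hstop
        exact hg2 hstop
      have hk2 : pvK age ags < ags.length := by
        rcases eq_or_lt_of_le (pvK_le_length age ags) with heq | hlt
        · exact absurd (pvK_lt age ags (by omega)) (not_le.mpr (lt_of_not_ge hg1))
        · exact hlt
      rw [pvALoop_eq age ags hk1 hk2 ags.length 0 (by omega) (by omega),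
          pvBLoop_eq age ags hs ags.length 0 ags.length (by omega) (pvK_le_length age ags) le_rfl (by omega)]
      simp only [Int.ofNat_eq_natCast]
      omega
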